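-- pv_equiv track=rewrite | github.com/Zolo-mario/zlua | zasm.py | split_punc
-- ===== SOURCE A (Python) =====
-- def split_punc(text):
--     """after split src with whitespace(so {parameter}text will not contain whitespace),
--     split with punctuation such that 'a,b' => ('a',',','b'), note that there is no space between 'a' and ','"""
--     lexeme = ''
--     index0 = 0
--     index1 = 0
--     ret = []
--     while True:
--         if index1 >= len(text): break
--         if text[index1] not in ':,{}()':
--             pass  # text[index1] is not punc
--         else:  # text[index1] is punc, lex the lexeme and punc and add to ret
--             lexeme = text[index0:index1]
--             if lexeme:  # tiny bug emerge when successive punc like '){' in 'Func _Main(1,2){', lexeme is '' which should not be added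
--                 ret.append(lexeme)
--             ret.append(text[index1])
--             index0 = index1 + 1  # move index0 to index1
--             lexeme = ''  # reset lexeme
--         index1 += 1
--     remainder = text[index0:]
--     if remainder:
--         ret.append(remainder)  # the last lexeme may not be appended, so append it
--     return ret
-- ===== SOURCE B (Python) =====
-- def split_punc(text):
--     """after split src with whitespace(so {parameter}text will not contain whitespace),
--     split with punctuation such that 'a,b' => ('a',',','b'), note that there is no space between 'a' and ','"""
--     ret = []
--     cur = []
--     for ch in text:
--         if ch in ':,{}()':
--             if cur:
--                 ret.append(''.join(cur))
--                 cur = []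
--             ret.append(ch)
--         else:
--             cur.append(ch)
--     if cur:
--         ret.append(''.join(cur))
--     return ret
-- ===== Notes on version B (the rewrite author's own statement) =====
-- stated objective: idiomatic
-- what changed: Replaced the two-index while loop with repeated slicing by a single for-each fold that accumulates the current lexeme's characters and flushes it when a punctuation character appears; no index arithmetic or slices remain.
import Mathlib
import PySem

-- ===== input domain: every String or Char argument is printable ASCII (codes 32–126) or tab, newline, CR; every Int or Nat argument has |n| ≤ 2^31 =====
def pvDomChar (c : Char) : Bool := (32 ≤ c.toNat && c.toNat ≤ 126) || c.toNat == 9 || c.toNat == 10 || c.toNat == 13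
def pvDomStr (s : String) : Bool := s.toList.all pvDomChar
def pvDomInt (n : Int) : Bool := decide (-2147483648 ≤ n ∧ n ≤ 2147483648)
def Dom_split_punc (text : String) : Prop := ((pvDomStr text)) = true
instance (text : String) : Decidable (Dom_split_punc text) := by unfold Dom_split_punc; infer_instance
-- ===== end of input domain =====

-- B replaces A's two-index while loop (slicing out each lexeme) with a single fold that
-- accumulates the current lexeme's characters and flushes on punctuation (objective: idiomatic).

-- ===== PORT A =====
-- the punctuation set ':,{}()' (shared by both Pythons' membership test `in ':,{}()'`)
def pvPunc : List Char := [':', ',', '{', '}', '(', ')']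

-- the `while True` loop of A, recursing on index1; text[i0:i1] / text[i0:] via PySem slices
def splitA_loop (cs : List Char) (i0 i1 : Nat) (ret : List String) : List String :=
  if h : i1 < cs.length then
    if cs[i1] ∉ pvPunc then
      splitA_loop cs i0 (i1 + 1) ret
    else
      let lexeme := PySem.List.slice cs (some (i0 : Int)) (some (i1 : Int))
      let ret1 := if lexeme ≠ [] then ret ++ [String.mk lexeme] else ret
      splitA_loop cs (i1 + 1) (i1 + 1) (ret1 ++ [String.mk [cs[i1]]])
  else
    let remainder := PySem.List.slice cs (some (i0 : Int)) none
    if remainder ≠ [] then ret ++ [String.mk remainder] else ret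
termination_by cs.length - i1

def split_punc (text : String) : List String := splitA_loop text.toList 0 0 []

-- ===== PORT B =====
-- `if cur: ret.append(''.join(cur))`
def pvFlush (ret : List String) (cur : List Char) : List String :=
  if cur ≠ [] then ret ++ [String.mk cur] else ret

-- loop body of B's `for ch in text`
def pvStepB (s : List String × List Char) (ch : Char) : List String × List Char :=
  if ch ∈ pvPunc then (pvFlush s.1 s.2 ++ [String.mk [ch]], [])
  else (s.1, s.2 ++ [ch])

def split_punc_alt (text : String) : List String :=
  let s := text.toList.foldl pvStepB ([], [])
  pvFlush s.1 s.2

-- ===== PRECONDITION & SPEC =====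
def Spec_split_punc (text : String) (out : List String) : Prop := out = split_punc_alt text
instance (text : String) (out : List String) : Decidable (Spec_split_punc text out) := by unfold Spec_split_punc; infer_instance

-- ===== CLAIM (what is proved, stated in full; the proofs are below) =====
def Claim_equal_split_punc : Prop := ∀ (text : String), Dom_split_punc text → Spec_split_punc text (split_punc text)

-- ===== LEMMAS AND PROOFS =====
lemma pv_take_succ_drop (cs : List Char) (i0 i1 : Nat) (h01 : i0 ≤ i1) (h : i1 < cs.length) :
    (cs.drop i0).take (i1 + 1 - i0) = (cs.drop i0).take (i1 - i0) ++ [cs[i1]] := by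
  have hk : i1 - i0 < (cs.drop i0).length := by simp [List.length_drop]; omega
  have h1 : i1 + 1 - i0 = (i1 - i0) + 1 := by omega
  rw [h1, List.take_succ]
  have : (cs.drop i0)[i1 - i0]? = some cs[i1] := by
    rw [List.getElem?_eq_getElem hk]
    congr 1
    rw [List.getElem_drop]
    congr 1
    omega
  simp [this]

-- loop invariant: A's loop from (i0, i1, ret) equals B's fold over the remaining characters
-- starting from ret and the pending lexeme text[i0:i1]
lemma pv_loop_eq : ∀ (n : Nat) (cs : List Char) (i0 i1 : Nat) (ret : List String),
    cs.length - i1 = n → i0 ≤ i1 → i1 ≤ cs.length →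
    splitA_loop cs i0 i1 ret =
      (let s := (cs.drop i1).foldl pvStepB (ret, (cs.drop i0).take (i1 - i0))
       pvFlush s.1 s.2) := by
  intro n
  induction n with
  | zero =>
      intro cs i0 i1 ret hn h01 h1
      have hlen : i1 = cs.length := by omega
      rw [splitA_loop]
      simp only [hlen]
      have hdrop : cs.drop cs.length = ([] : List Char) := by simp
      have hcur : (cs.drop i0).take (cs.length - i0) = cs.drop i0 := by
        apply List.take_of_length_le
        simp [List.length_drop]
      simp [hdrop, hcur, PySem.List.slice_from_natCast, pvFlush]
  | succ n ih =>
      intro cs i0 i1 ret hn h01 h1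
      have h : i1 < cs.length := by omega
      have hdrop : cs.drop i1 = cs[i1] :: cs.drop (i1 + 1) :=
        List.drop_eq_getElem_cons h
      rw [splitA_loop]
      simp only [dif_pos h]
      by_cases hp : cs[i1] ∈ pvPunc
      · simp only [hp, not_true_eq_false, if_neg, ite_false]
        rw [ih cs (i1 + 1) (i1 + 1) _ (by omega) le_rfl (by omega)]
        rw [hdrop]
        simp only [List.foldl_cons]
        have hstep : pvStepB (ret, (cs.drop i0).take (i1 - i0)) cs[i1]
            = ((if (cs.drop i0).take (i1 - i0) ≠ [] then
                  ret ++ [String.mk ((cs.drop i0).take (i1 - i0))] else ret)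
                ++ [String.mk [cs[i1]]], []) := by
          simp [pvStepB, hp, pvFlush]
        rw [hstep]
        have hlex : PySem.List.slice cs (some (i0 : Int)) (some (i1 : Int))
            = (cs.drop i0).take (i1 - i0) := PySem.List.slice_natCast cs i0 i1
        simp [hlex]
      · simp only [hp, not_false_eq_true, if_pos]
        rw [ih cs i0 (i1 + 1) ret (by omega) (by omega) (by omega)]
        rw [hdrop]
        simp only [List.foldl_cons]
        have hstep : pvStepB (ret, (cs.drop i0).take (i1 - i0)) cs[i1]
            = (ret, (cs.drop i0).take (i1 - i0) ++ [cs[i1]]) := by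
          simp [pvStepB, hp]
        rw [hstep, ← pv_take_succ_drop cs i0 i1 h01 h]

-- ===== VERDICT (by name: the statement is the Claim_ definition above) =====
theorem split_punc_spec : Claim_equal_split_punc := by
  intro text _
  unfold Spec_split_punc split_punc split_punc_alt
  rw [pv_loop_eq (text.toList.length) text.toList 0 0 [] (by omega) le_rfl (by omega)]
  simp
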